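-- pv_equiv track=rewrite | github.com/queelius/computational-explorations | src/coprime_ramsey.py | has_monochromatic_clique
-- ===== SOURCE A (Python) =====
-- import math
-- from itertools import combinations, product
-- from typing import Set, List, Tuple, Optional
--
-- def has_monochromatic_clique(n: int, k: int, coloring: dict) -> Optional[Tuple[int, Set[int]]]:
--     """
--     Check if a 2-coloring of coprime edges of [n] has a monochromatic K_k.
--
--     Returns (color, vertices) if found, None otherwise.
--     """
--     vertices = list(range(1, n + 1))
--
--     # Find all k-subsets that are cliques in the coprime graph
--     for subset in combinations(vertices, k):
--         subset_set = set(subset)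
--         # Check if all pairs are coprime
--         all_coprime = True
--         for i in range(len(subset)):
--             for j in range(i + 1, len(subset)):
--                 if math.gcd(subset[i], subset[j]) != 1:
--                     all_coprime = False
--                     break
--             if not all_coprime:
--                 break
--
--         if not all_coprime:
--             continue
--
--         # Check if all edges have the same color
--         edge_colors = set()
--         for i in range(len(subset)):
--             for j in range(i + 1, len(subset)):
--                 edge = (subset[i], subset[j])
--                 edge_colors.add(coloring.get(edge, -1))
--
--         if len(edge_colors) == 1:
--             color = edge_colors.pop()
--             return (color, subset_set)
--
--     return None
-- ===== SOURCE B (Python) =====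
-- import math
--
--
-- def has_monochromatic_clique(n: int, k: int, coloring: dict):
--     """DFS backtracking: extend cliques in lex order with incremental
--     coprimality/colour checks, pruning whole branches early."""
--     if k < 2:
--         return None
--
--     def extend(clique, color, v):
--         # Check v against every current member; thread the clique colour.
--         # Returns None on failure, else a 1-tuple holding the new colour state.
--         for u in clique:
--             if math.gcd(u, v) != 1:
--                 return None
--             c = coloring.get((u, v), -1)
--             if color is None:
--                 color = c
--             elif c != color:
--                 return None
--         return (color,)
--
--     def dfs(cands, clique, color, need):
--         if need == 0:
--             return None if color is None else (color, set(clique))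
--         if need > len(cands):
--             return None
--         for i, v in enumerate(cands):
--             r = extend(clique, color, v)
--             if r is not None:
--                 found = dfs(cands[i + 1:], clique + [v], r[0], need - 1)
--                 if found is not None:
--                     return found
--         return None
--
--     return dfs(list(range(1, n + 1)), [], None, k)
-- ===== Notes on version B (the rewrite author's own statement) =====
-- stated objective: alternative
-- what changed: Replaces A's generate-every-k-subset-then-test scan (full pairwise coprimality pass plus a full edge-colour-set pass per subset) with DFS backtracking that extends cliques in lex order, checking coprimality and colour consistency incrementally against only the new vertex and pruning branches that fail early or lack enough remaining candidates.
import Mathlib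
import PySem

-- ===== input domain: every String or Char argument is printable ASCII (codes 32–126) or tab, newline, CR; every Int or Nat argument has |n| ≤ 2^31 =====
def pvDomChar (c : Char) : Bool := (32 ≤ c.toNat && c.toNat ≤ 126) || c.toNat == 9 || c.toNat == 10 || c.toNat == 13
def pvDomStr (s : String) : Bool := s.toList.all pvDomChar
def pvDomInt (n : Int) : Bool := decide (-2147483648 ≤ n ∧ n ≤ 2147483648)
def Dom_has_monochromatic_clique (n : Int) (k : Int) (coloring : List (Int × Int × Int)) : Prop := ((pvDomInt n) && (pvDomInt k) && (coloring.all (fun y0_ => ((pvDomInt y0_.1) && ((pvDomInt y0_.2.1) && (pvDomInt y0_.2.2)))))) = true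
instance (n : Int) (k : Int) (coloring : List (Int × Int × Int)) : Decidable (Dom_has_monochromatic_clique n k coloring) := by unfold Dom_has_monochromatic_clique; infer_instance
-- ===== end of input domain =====

-- B replaces A's test-every-k-subset scan by lex-order DFS backtracking with
-- incremental coprime/colour checks and pruning; equal return values on k ≥ 0.

-- ===== PORT A =====

-- coloring.get((u, v), -1): the flattened dict entries (a, b, c) are the
-- association pairs ((a, b), c); first-match lookup with default -1.
-- exact: the dict has unique keys, so .get((u,v),-1) is the first (only) match, else -1
def pvColorGet (coloring : List (Int × Int × Int)) (u v : Int) : Int :=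
  match coloring.find? (fun t => t.1 == u && t.2.1 == v) with
  | some t => t.2.2
  | none => -1

-- the 'for subset in combinations(vertices, k)' loop with its early return:
-- lazily visits the k-subsets in itertools' lexicographic order, stopping at the
-- first subset on which the body returns
def pvFindCombo {R : Type} : List Int → Nat → (List Int → Option R) → Option R
  | _, 0, f => f []
  | [], _ + 1, _ => none
  | x :: xs, m + 1, f =>
      match pvFindCombo xs m (fun t => f (x :: t)) with
      | some r => some r
      | none => pvFindCombo xs (m + 1) f

-- the nested i<j loop with the all_coprime flag and breaks
def pvAllCoprime : List Int → Bool
  | [] => true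
  | x :: xs => (xs.all fun y => Int.gcd x y == 1) && pvAllCoprime xs

-- the nested i<j loop building edge_colors (a Python set)
def pvEdgeColors (coloring : List (Int × Int × Int)) : List Int → PySem.Set Int → PySem.Set Int
  | [], s => s
  | x :: xs, s =>
      pvEdgeColors coloring xs (xs.foldl (fun s y => PySem.Set.add s (pvColorGet coloring x y)) s)

def has_monochromatic_clique (n : Int) (k : Int) (coloring : List (Int × Int × Int)) : Option (Int × List Int) :=
  if k < 0 then none  -- combinations(vertices, k) raises ValueError (outside Pre_)
  else
    pvFindCombo (PySem.List.pyRange 1 (n + 1) 1) k.toNat (fun subset =>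
      if pvAllCoprime subset then
        match pvEdgeColors coloring subset PySem.Set.empty with
        | [c] => some (c, PySem.Set.ofList subset)
        | _ => none
      else none)

-- ===== PORT B =====

-- check v against every clique member, threading the clique colour;
-- none = fail, some c = the updated colour state
def pvExtend (coloring : List (Int × Int × Int)) : List Int → Option Int → Int → Option (Option Int)
  | [], color, _ => some color
  | u :: rest, color, v =>
      if Int.gcd u v == 1 then
        let c := pvColorGet coloring u v
        match color with
        | none => pvExtend coloring rest (some c) v
        | some c0 => if c == c0 then pvExtend coloring rest (some c0) v else none
      else none

def pvDfs (coloring : List (Int × Int × Int)) : List Int → List Int → Option Int → Nat → Option (Int × List Int)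
  | _, clique, color, 0 =>
      match color with
      | some c => some (c, clique)
      | none => none
  | [], _, _, _ + 1 => none
  | v :: rest, clique, color, need + 1 =>
      if rest.length < need then none  -- not enough candidates left to reach size k
      else match pvExtend coloring clique color v with
      | some color' =>
          match pvDfs coloring rest (clique ++ [v]) color' need with
          | some r => some r
          | none => pvDfs coloring rest clique color (need + 1)
      | none => pvDfs coloring rest clique color (need + 1)

def has_monochromatic_clique_alt (n : Int) (k : Int) (coloring : List (Int × Int × Int)) : Option (Int × List Int) :=
  if k < 2 then none
  else pvDfs coloring (PySem.List.pyRange 1 (n + 1) 1) [] none k.toNat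

-- ===== PRECONDITION & SPEC =====
-- Pre_ excludes only k < 0, where A raises ValueError (combinations with negative r).
def Pre_has_monochromatic_clique (n : Int) (k : Int) (coloring : List (Int × Int × Int)) : Prop := 0 ≤ k
instance (n : Int) (k : Int) (coloring : List (Int × Int × Int)) : Decidable (Pre_has_monochromatic_clique n k coloring) := by unfold Pre_has_monochromatic_clique; infer_instance

def pvWitness_has_monochromatic_clique : Int × Int × (List (Int × Int × Int)) := (4, 2, [(1, 2, 0)])

def Spec_has_monochromatic_clique (n : Int) (k : Int) (coloring : List (Int × Int × Int)) (out : Option (Int × List Int)) : Prop := out = has_monochromatic_clique_alt n k coloring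
instance (n : Int) (k : Int) (coloring : List (Int × Int × Int)) (out : Option (Int × List Int)) : Decidable (Spec_has_monochromatic_clique n k coloring out) := by unfold Spec_has_monochromatic_clique; infer_instance

-- ===== CLAIM (what is proved, stated in full; the proofs are below) =====
def Claim_equal_has_monochromatic_clique : Prop := ∀ (n : Int) (k : Int) (coloring : List (Int × Int × Int)), Dom_has_monochromatic_clique n k coloring → Pre_has_monochromatic_clique n k coloring → Spec_has_monochromatic_clique n k coloring (has_monochromatic_clique n k coloring)

-- ===== LEMMAS AND PROOFS =====

-- itertools.combinations(l, k): k-subsets of l in lexicographic order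
def pvCombos : List Int → Nat → List (List Int)
  | _, 0 => [[]]
  | [], _ + 1 => []
  | x :: xs, m + 1 => (pvCombos xs m).map (x :: ·) ++ pvCombos xs (m + 1)

-- pvFindCombo is findSome? over the materialised combination list
theorem findCombo_eq_findSome {R : Type} :
    ∀ (l : List Int) (k : Nat) (f : List Int → Option R),
      pvFindCombo l k f = (pvCombos l k).findSome? f := by
  intro l
  induction l with
  | nil =>
      intro k f
      cases k with
      | zero => simp [pvFindCombo, pvCombos]
      | succ m => simp [pvFindCombo, pvCombos]
  | cons x xs ih =>
      intro k f
      cases k with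
      | zero => simp [pvFindCombo, pvCombos]
      | succ m =>
          simp only [pvFindCombo, pvCombos, List.findSome?_append, List.findSome?_map, ih]
          cases hF : (pvCombos xs m).findSome? (f ∘ (x :: ·)) with
          | some r =>
              have : (pvCombos xs m).findSome? (fun t => f (x :: t)) = some r := hF
              simp [this]
          | none =>
              have : (pvCombos xs m).findSome? (fun t => f (x :: t)) = none := hF
              simp [this, ih]

-- the new edges (u, v) checked by the DFS when it grows clique by s, in check order
def pvNewEdges : List Int → List Int → List (Int × Int)
  | _, [] => []
  | clique, v :: s => clique.map (·, v) ++ pvNewEdges (clique ++ [v]) s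

-- the edges enumerated by A's nested i<j loops
def pvEdgesA : List Int → List (Int × Int)
  | [] => []
  | x :: xs => xs.map (x, ·) ++ pvEdgesA xs

-- colour-threading as a pure fold over a colour list
def pvMono : Option Int → List Int → Option (Option Int)
  | c, [] => some c
  | none, x :: l => pvMono (some x) l
  | some c, x :: l => if x == c then pvMono (some c) l else none

-- straight-line form of run: process s after (clique, color)
def pvRun (coloring : List (Int × Int × Int)) : List Int → Option Int → List Int → Option (Int × List Int)
  | clique, color, [] =>
      match color with
      | some c => some (c, clique)
      | none => none
  | clique, color, v :: s =>
      match pvExtend coloring clique color v with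
      | some c' => pvRun coloring (clique ++ [v]) c' s
      | none => none

theorem findSome?_congr_mem {α β : Type} {f g : α → Option β} :
    ∀ (l : List α), (∀ x ∈ l, f x = g x) → l.findSome? f = l.findSome? g := by
  intro l h
  induction l with
  | nil => rfl
  | cons x xs ih =>
      simp only [List.findSome?_cons, h x (by simp)]
      cases g x with
      | none => exact ih (fun y hy => h y (by simp [hy]))
      | some b => rfl

theorem findSome?_const_none {α β : Type} : ∀ (l : List α), l.findSome? (fun _ => (none : Option β)) = none := by
  intro l; induction l with
  | nil => rfl
  | cons x xs ih => simpa [List.findSome?_cons] using ih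

theorem combos_sublist : ∀ (l : List Int) (k : Nat) (t : List Int), t ∈ pvCombos l k → t.Sublist l := by
  intro l
  induction l with
  | nil =>
      intro k t ht
      cases k with
      | zero => simp [pvCombos] at ht; simp [ht]
      | succ m => simp [pvCombos] at ht
  | cons x xs ih =>
      intro k t ht
      cases k with
      | zero => simp [pvCombos] at ht; simp [ht]
      | succ m =>
          simp only [pvCombos, List.mem_append, List.mem_map] at ht
          rcases ht with ⟨u, hu, rfl⟩ | ht
          · exact List.Sublist.cons₂ x (ih m u hu)
          · exact List.Sublist.cons x (ih (m + 1) t ht)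

theorem combos_nil_of_short : ∀ (l : List Int) (k : Nat), l.length < k → pvCombos l k = [] := by
  intro l
  induction l with
  | nil =>
      intro k hk
      cases k with
      | zero => cases hk
      | succ m => rfl
  | cons x xs ih =>
      intro k hk
      cases k with
      | zero => cases hk
      | succ m =>
          have h1 : xs.length < m := by simpa using hk
          simp [pvCombos, ih m h1, ih (m + 1) (Nat.lt_succ_of_lt h1)]

-- dfs = findSome? of the straight-line run over the combinations list
theorem dfs_eq_findSome (coloring : List (Int × Int × Int)) :
    ∀ (cands : List Int) (need : Nat) (clique : List Int) (color : Option Int),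
      pvDfs coloring cands clique color need
        = (pvCombos cands need).findSome? (pvRun coloring clique color) := by
  intro cands
  induction cands with
  | nil =>
      intro need clique color
      cases need with
      | zero => simp [pvDfs, pvCombos, List.findSome?, pvRun]
      | succ m => simp [pvDfs, pvCombos, List.findSome?]
  | cons v rest ih =>
      intro need clique color
      cases need with
      | zero => simp [pvDfs, pvCombos, List.findSome?, pvRun]
      | succ m =>
          by_cases hlen : rest.length < m
          · have hl : (v :: rest).length < m + 1 := by simpa using hlen
            simp [pvDfs, hlen, combos_nil_of_short _ _ hl]
          · simp only [pvDfs, hlen, if_false, pvCombos, List.findSome?_append, List.findSome?_map]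
            have h1 : (pvCombos rest m).findSome? ((pvRun coloring clique color) ∘ (v :: ·))
                = match pvExtend coloring clique color v with
                  | some c' => pvDfs coloring rest (clique ++ [v]) c' m
                  | none => none := by
              cases hE : pvExtend coloring clique color v with
              | some c' =>
                  simp only [ih m (clique ++ [v]) c']
                  refine findSome?_congr_mem _ (fun s _ => ?_)
                  simp [Function.comp, pvRun, hE]
              | none =>
                  have : ∀ s ∈ pvCombos rest m, ((pvRun coloring clique color) ∘ (v :: ·)) s = none := by
                    intro s _; simp [Function.comp, pvRun, hE]
                  rw [findSome?_congr_mem _ this, findSome?_const_none]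
            rw [h1]
            cases hE : pvExtend coloring clique color v with
            | some c' =>
                cases hD : pvDfs coloring rest (clique ++ [v]) c' m with
                | some r => simp [hD]
                | none => simp [hD, ih (m + 1) clique color]
            | none => simp [ih (m + 1) clique color]

-- pvExtend as an "all-gcds ∧ colour fold" straight-line check
theorem extend_eq (coloring : List (Int × Int × Int)) :
    ∀ (clique : List Int) (color : Option Int) (v : Int),
      pvExtend coloring clique color v
        = if clique.all (fun u => Int.gcd u v == 1)
          then pvMono color (clique.map (fun u => pvColorGet coloring u v))
          else none := by
  intro clique
  induction clique with
  | nil => intro color v; simp [pvExtend, pvMono]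
  | cons u rest ih =>
      intro color v
      by_cases hg : (Int.gcd u v == 1) = true
      · cases color with
        | none => simp [pvExtend, hg, ih, pvMono]
        | some c0 =>
            by_cases hc : (pvColorGet coloring u v == c0) = true
            · have hcv : pvColorGet coloring u v = c0 := by simpa using hc
              simp [pvExtend, hg, ih, pvMono, hcv]
            · simp [pvExtend, hg, hc, pvMono, ite_self]
      · simp [pvExtend, hg]

theorem mono_append : ∀ (l₁ l₂ : List Int) (c : Option Int),
    pvMono c (l₁ ++ l₂) = (pvMono c l₁).bind (fun c' => pvMono c' l₂) := by
  intro l₁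
  induction l₁ with
  | nil => intro l₂ c; simp [pvMono]
  | cons x l ih =>
      intro l₂ c
      cases c with
      | none => simpa [pvMono] using ih l₂ (some x)
      | some c0 =>
          by_cases h : x == c0
          · simp [pvMono, h, ih]
          · simp [pvMono, h]

-- run as an "all-gcds ∧ colour fold" straight-line check over the new edges
theorem run_eq (coloring : List (Int × Int × Int)) :
    ∀ (s clique : List Int) (color : Option Int),
      pvRun coloring clique color s
        = if (pvNewEdges clique s).all (fun e => Int.gcd e.1 e.2 == 1)
          then match pvMono color ((pvNewEdges clique s).map (fun e => pvColorGet coloring e.1 e.2)) with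
               | some (some c) => some (c, clique ++ s)
               | some none => none
               | none => none
          else none := by
  intro s
  induction s with
  | nil =>
      intro clique color
      cases color <;> simp [pvRun, pvNewEdges, pvMono]
  | cons v s ih =>
      intro clique color
      simp only [pvRun, pvNewEdges, List.all_append, List.map_append, extend_eq, mono_append]
      by_cases hg : clique.all (fun u => Int.gcd u v == 1)
      · have hg' : (clique.map (·, v)).all (fun e => Int.gcd e.1 e.2 == 1) = true := by
          simp only [List.all_map]
          simpa using hg
        have hmap : (clique.map (·, v)).map (fun e => pvColorGet coloring e.1 e.2)
            = clique.map (fun u => pvColorGet coloring u v) := by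
          simp [List.map_map, Function.comp]
        cases hM : pvMono color (clique.map (fun u => pvColorGet coloring u v)) with
        | some c' =>
            simp only [hg, if_true, hM, ih, hg', hmap, Bool.true_and, Option.bind_some]
            simp [List.append_assoc]
        | none =>
            simp only [hg, if_true, hM, hg', hmap, Bool.true_and, Option.bind_none]
            split <;> rfl
      · have hg' : (clique.map (·, v)).all (fun e => Int.gcd e.1 e.2 == 1) = false := by
          simp only [List.all_map]
          simpa using hg
        simp [hg, hg']

-- membership in pvNewEdges, via the cross edges + pvEdgesA decomposition
theorem mem_newEdges : ∀ (s clique : List Int) (p : Int × Int),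
    p ∈ pvNewEdges clique s ↔ (∃ u ∈ clique, ∃ w ∈ s, p = (u, w)) ∨ p ∈ pvEdgesA s := by
  intro s
  induction s with
  | nil => intro clique p; simp [pvNewEdges, pvEdgesA]
  | cons v s ih =>
      intro clique p
      simp only [pvNewEdges, pvEdgesA, List.mem_append, List.mem_map, ih, List.mem_cons]
      constructor
      · rintro (⟨u, hu, rfl⟩ | ⟨u, hu, w, hw, rfl⟩ | h)
        · exact Or.inl ⟨u, hu, v, Or.inl rfl, rfl⟩
        · rcases hu with hu | hu | hu
          · exact Or.inl ⟨u, hu, w, Or.inr hw, rfl⟩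
          · subst hu; exact Or.inr (Or.inl ⟨w, hw, rfl⟩)
          · cases hu
        · exact Or.inr (Or.inr h)
      · rintro (⟨u, hu, w, (rfl | hw), rfl⟩ | ⟨w, hw, rfl⟩ | h)
        · exact Or.inl ⟨u, hu, rfl⟩
        · exact Or.inr (Or.inl ⟨u, Or.inl hu, w, hw, rfl⟩)
        · exact Or.inr (Or.inl ⟨v, Or.inr (Or.inl rfl), w, hw, rfl⟩)
        · exact Or.inr (Or.inr h)

theorem pv_all_and {α : Type} (l : List α) (p q : α → Bool) :
    (l.all fun x => p x && q x) = (l.all p && l.all q) := by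
  induction l with
  | nil => rfl
  | cons x xs ih => simp [ih]; ac_rfl

-- all-gcd over the DFS edge list = A's nested all_coprime loop
theorem newEdges_all_gcd : ∀ (s : List Int),
    (pvNewEdges [] s).all (fun e => Int.gcd e.1 e.2 == 1) = pvAllCoprime s := by
  have gen : ∀ (s clique : List Int),
      (pvNewEdges clique s).all (fun e => Int.gcd e.1 e.2 == 1)
        = (s.all (fun w => clique.all (fun u => Int.gcd u w == 1)) && pvAllCoprime s) := by
    intro s
    induction s with
    | nil => intro clique; simp [pvNewEdges, pvAllCoprime]
    | cons v s ih =>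
        intro clique
        have h1 : (pvNewEdges clique (v :: s)).all (fun e => Int.gcd e.1 e.2 == 1)
            = ((clique.all fun u => Int.gcd u v == 1)
               && (pvNewEdges (clique ++ [v]) s).all (fun e => Int.gcd e.1 e.2 == 1)) := by
          simp [pvNewEdges, List.all_append, List.all_map, Function.comp_def]
        have h2 : (fun w => (clique ++ [v]).all fun u => Int.gcd u w == 1)
            = (fun w => (clique.all fun u => Int.gcd u w == 1) && (Int.gcd v w == 1)) := by
          funext w; simp [List.all_append]
        rw [h1, ih, h2]
        simp only [pv_all_and, pvAllCoprime, List.all_cons]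
        ac_rfl
  intro s
  rw [gen s []]
  simp

-- pvMono with colour none, functional characterisation
theorem mono_none_char : ∀ (l : List Int),
    pvMono none l = match l with
      | [] => some none
      | x :: l' => if l'.all (· == x) then some (some x) else none := by
  have hsome : ∀ (l : List Int) (c : Int),
      pvMono (some c) l = if l.all (· == c) then some (some c) else none := by
    intro l
    induction l with
    | nil => intro c; simp [pvMono]
    | cons x l ih =>
        intro c
        by_cases h : x == c
        · simp [pvMono, h, ih]
        · simp [pvMono, h]
  intro l
  cases l with
  | nil => rfl
  | cons x l' => simp [pvMono, hsome]

-- pvEdgeColors is the fold of Set.add over the colours of A's edge list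
theorem edgeColors_eq_foldl (coloring : List (Int × Int × Int)) :
    ∀ (s : List Int) (acc : PySem.Set Int),
      pvEdgeColors coloring s acc
        = (pvEdgesA s).foldl (fun t e => PySem.Set.add t (pvColorGet coloring e.1 e.2)) acc := by
  intro s
  induction s with
  | nil => intro acc; simp [pvEdgeColors, pvEdgesA]
  | cons x xs ih =>
      intro acc
      simp only [pvEdgeColors, pvEdgesA, List.foldl_append, ih]
      congr 1
      rw [List.foldl_map]

theorem mem_edgeColors (coloring : List (Int × Int × Int)) (s : List Int) (y : Int) :
    y ∈ pvEdgeColors coloring s [] ↔ ∃ e ∈ pvEdgesA s, y = pvColorGet coloring e.1 e.2 := by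
  rw [edgeColors_eq_foldl]
  simpa using PySem.Set.mem_foldl_add (f := fun e => pvColorGet coloring e.1 e.2)
    (l := pvEdgesA s) (s := ([] : PySem.Set Int)) (y := y)

theorem nodup_foldl_add {l : List (Int × Int)} {f : Int × Int → Int} :
    ∀ (acc : PySem.Set Int), acc.Nodup → (l.foldl (fun t e => PySem.Set.add t (f e)) acc).Nodup := by
  induction l with
  | nil => intro acc h; simpa using h
  | cons e l ih => intro acc h; exact ih _ (PySem.Set.nodup_add _ _ h)

theorem nodup_edgeColors (coloring : List (Int × Int × Int)) (s : List Int) :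
    (pvEdgeColors coloring s []).Nodup := by
  rw [edgeColors_eq_foldl]
  exact nodup_foldl_add [] List.nodup_nil

-- a Nodup list whose members are exactly {c} is [c]
theorem nodup_eq_singleton {l : List Int} {c : Int} (hnd : l.Nodup)
    (hc : c ∈ l) (hall : ∀ x ∈ l, x = c) : l = [c] := by
  cases l with
  | nil => cases hc
  | cons x t =>
      have hx : x = c := hall x (by simp)
      subst hx
      cases t with
      | nil => rfl
      | cons y t' =>
          have hy : y = x := hall y (by simp)
          rw [List.nodup_cons] at hnd
          exact absurd (by simp [hy]) hnd.1

-- the per-subset agreement: A's check of subset = the DFS run from scratch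
theorem check_eq_run (coloring : List (Int × Int × Int)) (s : List Int) (hnd : s.Nodup) :
    (if pvAllCoprime s then
        match pvEdgeColors coloring s PySem.Set.empty with
        | [c] => some (c, PySem.Set.ofList s)
        | _ => none
      else none)
      = pvRun coloring [] none s := by
  rw [run_eq]
  rw [newEdges_all_gcd]
  by_cases hcop : pvAllCoprime s
  · simp only [hcop, if_true]
    have hofl : PySem.Set.ofList s = s := PySem.Set.ofList_eq_self_of_nodup _ hnd
    have hmemE : ∀ p : Int × Int, p ∈ pvNewEdges [] s ↔ p ∈ pvEdgesA s := by
      intro p; rw [mem_newEdges]; simp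
    have hmemC : ∀ y : Int,
        (y ∈ (pvNewEdges [] s).map (fun e => pvColorGet coloring e.1 e.2))
          ↔ y ∈ pvEdgeColors coloring s [] := by
      intro y
      rw [mem_edgeColors]
      simp only [List.mem_map]
      constructor
      · rintro ⟨e, he, rfl⟩; exact ⟨e, (hmemE e).mp he, rfl⟩
      · rintro ⟨e, he, rfl⟩; exact ⟨e, (hmemE e).mpr he, rfl⟩
    rw [mono_none_char]
    cases hL : (pvNewEdges [] s).map (fun e => pvColorGet coloring e.1 e.2) with
    | nil =>
        have hempty : pvEdgeColors coloring s [] = [] := by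
          cases hE : pvEdgeColors coloring s [] with
          | nil => rfl
          | cons y t =>
              have : y ∈ ([] : List Int) := by
                rw [← hL]; exact (hmemC y).mpr (by simp [hE])
              cases this
        simp [PySem.Set.empty, hempty]
    | cons x L' =>
        by_cases hall : L'.all (· == x)
        · have hallx : ∀ y ∈ (pvNewEdges [] s).map (fun e => pvColorGet coloring e.1 e.2), y = x := by
            intro y hy
            rw [hL] at hy
            rcases List.mem_cons.mp hy with rfl | hy
            · rfl
            · simpa using (List.all_eq_true.mp hall) y hy
          have hEC : pvEdgeColors coloring s [] = [x] := by
            refine nodup_eq_singleton (nodup_edgeColors coloring s) ?_ ?_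
            · exact (hmemC x).mp (by rw [hL]; simp)
            · intro y hy; exact hallx y ((hmemC y).mpr hy)
          simp [PySem.Set.empty, hEC, hall, hofl]
        · have ⟨y, hyL', hyx⟩ : ∃ y ∈ L', ¬ (y == x) = true := by
            by_contra h; push_neg at h; exact hall (List.all_eq_true.mpr h)
          have hyne : y ≠ x := by simpa using hyx
          have hxE : x ∈ pvEdgeColors coloring s [] := (hmemC x).mp (by rw [hL]; simp)
          have hyE : y ∈ pvEdgeColors coloring s [] := (hmemC y).mp (by rw [hL]; simp [hyL'])
          have hne1 : ∀ c, pvEdgeColors coloring s [] ≠ [c] := by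
            intro c hc
            rw [hc] at hxE hyE
            simp at hxE hyE
            exact hyne (hyE.trans hxE.symm)
          simp only [hall, if_false]
          cases hE : pvEdgeColors coloring s [] with
          | nil => simp [PySem.Set.empty, hE]
          | cons z t =>
              cases t with
              | nil => exact absurd hE (hne1 z)
              | cons w t' => simp [PySem.Set.empty, hE]
  · simp [hcop]

theorem dfs_need_zero (coloring : List (Int × Int × Int)) :
    ∀ (cands : List Int), pvDfs coloring cands [] none 0 = none := by
  intro cands; cases cands <;> rfl

theorem dfs_need_one (coloring : List (Int × Int × Int)) :
    ∀ (cands : List Int), pvDfs coloring cands [] none 1 = none := by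
  intro cands
  induction cands with
  | nil => rfl
  | cons v rest ih => simp [pvDfs, pvExtend, ih]

-- ===== VERDICT (by name: the statement is the Claim_ definition above) =====
theorem has_monochromatic_clique_spec : Claim_equal_has_monochromatic_clique := by
  intro n k coloring _ hk
  unfold Spec_has_monochromatic_clique
  unfold has_monochromatic_clique has_monochromatic_clique_alt
  have hk0 : ¬ k < 0 := not_lt.mpr hk
  simp only [hk0, if_false]
  rw [findCombo_eq_findSome]
  have main : (pvCombos (PySem.List.pyRange 1 (n + 1) 1) k.toNat).findSome? (fun subset =>
      if pvAllCoprime subset then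
        match pvEdgeColors coloring subset PySem.Set.empty with
        | [c] => some (c, PySem.Set.ofList subset)
        | _ => none
      else none)
      = pvDfs coloring (PySem.List.pyRange 1 (n + 1) 1) [] none k.toNat := by
    rw [dfs_eq_findSome]
    refine findSome?_congr_mem _ (fun s hs => ?_)
    have hnd : s.Nodup :=
      (combos_sublist _ _ _ hs).nodup (PySem.List.nodup_pyRange_one 1 (n + 1))
    exact check_eq_run coloring s hnd
  rw [main]
  by_cases hk2 : k < 2
  · simp only [hk2, if_true]
    interval_cases k
    · exact dfs_need_zero coloring _
    · exact dfs_need_one coloring _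
  · simp [hk2]
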